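-- pv_equiv track=rewrite | github.com/leozecs/Projeto-desenvolvimento-web | Rede-Vermelha/backend/app.py | validar_doador
-- ===== SOURCE A (Python) =====
-- def validar_doador(data):
--     obrigatorios = [
--         'nome', 'data_nascimento', 'genero', 'cpf_rg', 'email', 'telefone',
--         'estado', 'cidade', 'cep', 'tipo_sanguineo', 'doacao_anteriores',
--         'medicacao', 'doenca', 'termos'
--     ]
--
--     erros = []
--     for campo in obrigatorios:
--         if campo not in data or str(data[campo]).strip() == '':
--             erros.append(f"Campo obrigatório ausente ou vazio: {campo}")
--
--     if 'email' in data and '@' not in data['email']: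
--         erros.append("E-mail inválido")
--     if 'cpf_rg' in data and len(data['cpf_rg']) < 5:
--         erros.append("CPF/RG inválido")
--
--     return erros
-- ===== SOURCE B (Python) =====
-- def validar_doador(data):
--     obrigatorios = [
--         'nome', 'data_nascimento', 'genero', 'cpf_rg', 'email', 'telefone',
--         'estado', 'cidade', 'cep', 'tipo_sanguineo', 'doacao_anteriores',
--         'medicacao', 'doenca', 'termos'
--     ]
--
--     # Build the error list back-to-front by recursion on the field list:
--     # the base case yields the two format checks, each recursive step
--     # prepends its required-field message (if any) onto the already-built tail.
--     def faltando(campos):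
--         if not campos:
--             tail = []
--             if 'email' in data and '@' not in data['email']:
--                 tail.append("E-mail inválido")
--             if 'cpf_rg' in data and len(data['cpf_rg']) < 5:
--                 tail.append("CPF/RG inválido")
--             return tail
--         campo, resto = campos[0], faltando(campos[1:])
--         if campo not in data or str(data[campo]).strip() == '':
--             return [f"Campo obrigatório ausente ou vazio: {campo}"] + resto
--         return resto
--
--     return faltando(obrigatorios)
-- ===== Notes on version B (the rewrite author's own statement) =====
-- stated objective: alternative
-- what changed: Replaces A's accumulator loop plus two trailing appends by a recursive back-to-front construction: the base case produces the two format-check messages and each recursive step conses its required-field message onto the already-built tail.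
import Mathlib
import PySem

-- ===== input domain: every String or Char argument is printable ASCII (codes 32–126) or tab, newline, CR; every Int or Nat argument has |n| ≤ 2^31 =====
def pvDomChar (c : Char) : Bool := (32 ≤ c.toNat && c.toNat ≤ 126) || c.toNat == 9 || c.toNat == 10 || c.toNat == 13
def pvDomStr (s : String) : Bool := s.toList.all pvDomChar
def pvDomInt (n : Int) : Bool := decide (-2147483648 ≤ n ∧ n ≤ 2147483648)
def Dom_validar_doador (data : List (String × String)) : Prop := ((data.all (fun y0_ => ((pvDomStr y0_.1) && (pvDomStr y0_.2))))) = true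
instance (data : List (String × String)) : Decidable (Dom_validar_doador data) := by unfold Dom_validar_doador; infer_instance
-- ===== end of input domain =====

-- B builds the error list back-to-front by recursion on the field list (base case = the two format checks, each step conses its message onto the tail), instead of A's accumulator loop plus two trailing appends; alternative decomposition, same cost.


-- ===== PORT A =====
def validar_doador (data : List (String × String)) : List String :=
  let obrigatorios : List String :=
    ["nome", "data_nascimento", "genero", "cpf_rg", "email", "telefone",
     "estado", "cidade", "cep", "tipo_sanguineo", "doacao_anteriores",
     "medicacao", "doenca", "termos"]
  let erros : List String := obrigatorios.foldl (fun erros campo =>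
      if (match PySem.Dict.get? (PySem.Dict.mk data) campo with
          | none => true
          | some v => PySem.Str.strip v == "")
      then erros ++ ["Campo obrigatório ausente ou vazio: " ++ campo]
      else erros) []
  let erros := if (match PySem.Dict.get? (PySem.Dict.mk data) "email" with
          | none => false
          | some v => !(PySem.Str.isIn "@" v))
      then erros ++ ["E-mail inválido"] else erros
  if (match PySem.Dict.get? (PySem.Dict.mk data) "cpf_rg" with
          | none => false
          | some v => decide (PySem.Str.len v < 5))
      then erros ++ ["CPF/RG inválido"] else erros

-- ===== PORT B =====
-- base case of Source B's recursion: the two format checks, appended in order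
def vd_tail (data : List (String × String)) : List String :=
  let tail : List String := []
  let tail := if (match PySem.Dict.get? (PySem.Dict.mk data) "email" with
          | none => false
          | some v => !(PySem.Str.isIn "@" v))
      then tail ++ ["E-mail inválido"] else tail
  if (match PySem.Dict.get? (PySem.Dict.mk data) "cpf_rg" with
          | none => false
          | some v => decide (PySem.Str.len v < 5))
      then tail ++ ["CPF/RG inválido"] else tail

-- Source B's 'faltando': recursion on the field list, consing onto the built tail
def vd_faltando (data : List (String × String)) : List String → List String
  | [] => vd_tail data
  | campo :: resto =>
    let r := vd_faltando data resto
    if (match PySem.Dict.get? (PySem.Dict.mk data) campo with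
        | none => true
        | some v => PySem.Str.strip v == "")
    then ("Campo obrigatório ausente ou vazio: " ++ campo) :: r
    else r

def validar_doador_alt (data : List (String × String)) : List String :=
  let obrigatorios : List String :=
    ["nome", "data_nascimento", "genero", "cpf_rg", "email", "telefone",
     "estado", "cidade", "cep", "tipo_sanguineo", "doacao_anteriores",
     "medicacao", "doenca", "termos"]
  vd_faltando data obrigatorios

-- ===== PRECONDITION & SPEC =====
def Spec_validar_doador (data : List (String × String)) (out : List String) : Prop := out = validar_doador_alt data
instance (data : List (String × String)) (out : List String) : Decidable (Spec_validar_doador data out) := by unfold Spec_validar_doador; infer_instance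

-- ===== CLAIM =====
def Claim_equal_validar_doador : Prop := ∀ (data : List (String × String)), Dom_validar_doador data → Spec_validar_doador data (validar_doador data)

-- ===== LEMMAS AND PROOFS =====
-- B's recursion equals "required-field messages, then the base-case tail"
theorem vd_faltando_eq (data : List (String × String)) (l : List String) :
    vd_faltando data l =
      (l.filter (fun campo => match PySem.Dict.get? (PySem.Dict.mk data) campo with
          | none => true
          | some v => PySem.Str.strip v == "")).map
        (fun campo => "Campo obrigatório ausente ou vazio: " ++ campo) ++ vd_tail data := by
  induction l with
  | nil => simp [vd_faltando]
  | cons c t ih =>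
    simp only [vd_faltando, ih, List.filter_cons]
    split <;> [simp_all; skip] <;> split_ifs <;> simp_all

-- ===== VERDICT =====
theorem validar_doador_spec : Claim_equal_validar_doador := by
  intro data _
  unfold Spec_validar_doador validar_doador validar_doador_alt
  rw [vd_faltando_eq]
  simp only [PySem.List.foldl_append_if, List.nil_append, vd_tail]
  split_ifs <;> simp_all
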